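-- pv_equiv track=rewrite | github.com/Kvkthecreator/yarnnnn | api/services/workspace.py | _parse_notes_md
-- ===== SOURCE A (Python) =====
-- from typing import Optional
--
-- def _parse_notes_md(content: Optional[str]) -> list[dict]:
--     """Parse notes.md into list of {type, content}."""
--     if not content:
--         return []
--     notes = []
--     for line in content.strip().split("\n"):
--         line = line.strip()
--         if not line.startswith("- "):
--             continue
--         text = line[2:].strip()
--         # Parse type prefix: "Instruction: ...", "Fact: ...", "Preference: ..."
--         for prefix in ("Instruction:", "Fact:", "Preference:"):
--             if text.startswith(prefix):
--                 notes.append({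
--                     "type": prefix.rstrip(":").lower(),
--                     "content": text[len(prefix):].strip(),
--                 })
--                 break
--         else:
--             notes.append({"type": "fact", "content": text})
--     return notes
-- ===== SOURCE B (Python) =====
-- from typing import Optional
--
-- _TYPES = {"Instruction": "instruction", "Fact": "fact", "Preference": "preference"}
--
--
-- def _note(text: str) -> dict:
--     head, sep, tail = text.partition(":")
--     if sep:
--         ty = _TYPES.get(head)
--         if ty is not None:
--             return {"type": ty, "content": tail.strip()}
--     return {"type": "fact", "content": text}
--
--
-- def _parse_notes_md(content: Optional[str]) -> list[dict]:
--     """Parse notes.md into list of {type, content}."""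
--     if not content:
--         return []
--     stripped = [line.strip() for line in content.strip().split("\n")]
--     return [_note(line[2:].strip()) for line in stripped if line.startswith("- ")]
-- ===== Notes on version B (the rewrite author's own statement) =====
-- stated objective: simpler
-- what changed: Replaces A's append-accumulator loop with an inner startswith-chain over three prefixes by a list comprehension plus a single partition on the first colon and one dict lookup of the head.
import Mathlib
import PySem

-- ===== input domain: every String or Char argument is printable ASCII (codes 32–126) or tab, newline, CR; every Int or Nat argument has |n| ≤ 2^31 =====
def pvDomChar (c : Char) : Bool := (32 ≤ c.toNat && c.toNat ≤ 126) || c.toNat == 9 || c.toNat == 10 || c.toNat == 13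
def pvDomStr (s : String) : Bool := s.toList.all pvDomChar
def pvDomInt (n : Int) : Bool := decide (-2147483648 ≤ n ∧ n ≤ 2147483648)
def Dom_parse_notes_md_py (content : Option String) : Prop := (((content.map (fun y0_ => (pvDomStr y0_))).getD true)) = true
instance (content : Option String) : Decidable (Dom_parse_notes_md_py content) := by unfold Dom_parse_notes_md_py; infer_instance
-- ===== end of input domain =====

-- B replaces A's accumulator loop with inner prefix chain by a comprehension with one partition on the first colon and a dict lookup (simpler decomposition, same cost).

-- ===== PORT A =====
-- p.rstrip(":") ported by hand (exact: drops trailing ':' characters)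
def pvRstripColon (p : String) : String :=
  String.ofList ((p.toList.reverse.dropWhile (· == ':')).reverse)

-- the inner 'for prefix in (...) … break / else' of A: first matching prefix wins, else the fact item
def pvInnerA (prefixes : List String) (text : String) : List (String × String) :=
  match prefixes with
  | [] => [("type", "fact"), ("content", text)]
  | p :: rest =>
    if PySem.Str.startswith text p then
      [("type", PySem.Str.lower (pvRstripColon p)),
       ("content", PySem.Str.strip (PySem.Str.slice text (some (PySem.Str.len p)) none))]
    else pvInnerA rest text

def parse_notes_md_py (content : Option String) : List (List (String × String)) :=
  match content with
  | none => []
  | some s =>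
    if s == "" then []  -- 'if not content'
    else
      let lines := (PySem.Str.split? (PySem.Str.strip s) "\n").getD []  -- sep "\n" ≠ "", never none
      lines.foldl (fun notes line =>
        let line := PySem.Str.strip line
        if !(PySem.Str.startswith line "- ") then notes
        else
          notes ++ [pvInnerA ["Instruction:", "Fact:", "Preference:"]
                      (PySem.Str.strip (PySem.Str.slice line (some 2) none))]) []

-- ===== PORT B =====
def pvTypes : PySem.Dict String String :=
  ⟨[("Instruction", "instruction"), ("Fact", "fact"), ("Preference", "preference")]⟩

-- text.partition(":") ported by hand via the first occurrence (exact for the 1-char separator)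
def pvPartitionColon (t : String) : String × String × String :=
  let i := PySem.Str.find t ":"
  if i == -1 then (t, "", "")
  else (String.ofList (t.toList.take i.toNat), ":", String.ofList (t.toList.drop (i.toNat + 1)))

def pvNoteB (text : String) : List (String × String) :=
  let pt := pvPartitionColon text
  if pt.2.1 ≠ "" then
    match PySem.Dict.get? pvTypes pt.1 with
    | some ty => [("type", ty), ("content", PySem.Str.strip pt.2.2)]
    | none => [("type", "fact"), ("content", text)]
  else [("type", "fact"), ("content", text)]

def parse_notes_md_py_alt (content : Option String) : List (List (String × String)) :=
  match content with
  | none => []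
  | some s =>
    if s == "" then []
    else
      let stripped := ((PySem.Str.split? (PySem.Str.strip s) "\n").getD []).map PySem.Str.strip
      (stripped.filter (fun l => PySem.Str.startswith l "- ")).map
        (fun l => pvNoteB (PySem.Str.strip (PySem.Str.slice l (some 2) none)))

-- ===== PRECONDITION & SPEC =====
def Spec_parse_notes_md_py (content : Option String) (out : List (List (String × String))) : Prop := out = parse_notes_md_py_alt content
instance (content : Option String) (out : List (List (String × String))) : Decidable (Spec_parse_notes_md_py content out) := by unfold Spec_parse_notes_md_py; infer_instance

-- ===== CLAIM (what is proved, stated in full; the proofs are below) =====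
def Claim_equal_parse_notes_md_py : Prop := ∀ (content : Option String), Dom_parse_notes_md_py content → Spec_parse_notes_md_py content (parse_notes_md_py content)

-- ===== LEMMAS AND PROOFS =====

-- [':'] is a prefix of l iff l starts with ':'
theorem pv_colon_prefix_iff (l : List Char) : [':'] <+: l ↔ ∃ r, l = ':' :: r := by
  constructor
  · rintro ⟨s, hs⟩
    exact ⟨s, hs.symm⟩
  · rintro ⟨r, rfl⟩
    exact ⟨r, rfl⟩

-- the first colon of 'X ++ ':' :: r' with ':' ∉ X is at position X.length
theorem pv_find_colon_append (X r : List Char) (hX : (':' : Char) ∉ X) :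
    PySem.Chars.find (X ++ ':' :: r) [':'] = (X.length : Int) := by
  have hnn : 0 ≤ PySem.Chars.find (X ++ ':' :: r) [':'] := by
    rw [PySem.Chars.find_nonneg_iff]
    exact ⟨X, r, by simp⟩
  obtain ⟨hpre, hmin⟩ := PySem.Chars.find_spec hnn
  set k : Nat := (PySem.Chars.find (X ++ ':' :: r) [':']).toNat with hk
  have hfk : PySem.Chars.find (X ++ ':' :: r) [':'] = (k : Int) := by omega
  rw [hfk]
  rcases lt_trichotomy k X.length with h | h | h
  · exfalso
    rw [pv_colon_prefix_iff] at hpre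
    obtain ⟨s, hs⟩ := hpre
    have hget : (X ++ ':' :: r)[k]? = some ':' := by
      rw [← List.head?_drop, hs]
      rfl
    rw [List.getElem?_append_left h] at hget
    exact hX (List.mem_of_getElem? hget)
  · exact_mod_cast h
  · exfalso
    apply hmin X.length (by omega)
    rw [pv_colon_prefix_iff]
    refine ⟨r, ?_⟩
    rw [List.drop_left]

-- startswith (X ++ ":") characterised by the first-colon position, for ':' ∉ X
theorem pv_startswith_colon_iff (t X : List Char) (hX : (':' : Char) ∉ X) :
    ((X ++ [':']) <+: t) ↔
      (0 ≤ PySem.Chars.find t [':'] ∧ t.take (PySem.Chars.find t [':']).toNat = X) := by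
  constructor
  · rintro ⟨r, hr⟩
    have ht : t = X ++ ':' :: r := by rw [← hr]; simp
    subst ht
    rw [pv_find_colon_append X r hX]
    simp
  · rintro ⟨hnn, htake⟩
    obtain ⟨hpre, -⟩ := PySem.Chars.find_spec hnn
    rw [pv_colon_prefix_iff] at hpre
    obtain ⟨r, hr⟩ := hpre
    refine ⟨r, ?_⟩
    have hsplit : t = t.take (PySem.Chars.find t [':']).toNat ++ t.drop (PySem.Chars.find t [':']).toNat :=
      (List.take_append_drop _ _).symm
    rw [htake, hr] at hsplit
    rw [hsplit]
    simp

-- the same, at String level: text.startswith(X ++ ":")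
theorem pv_sw_iff (text p X : String) (hpl : p.toList = X.toList ++ [':'])
    (hX : (':' : Char) ∉ X.toList) :
    PySem.Str.startswith text p = true ↔
      (0 ≤ PySem.Chars.find text.toList [':'] ∧
       text.toList.take (PySem.Chars.find text.toList [':']).toNat = X.toList) := by
  rw [PySem.Str.startswith_eq, PySem.Chars.startswith_iff, hpl]
  exact pv_startswith_colon_iff text.toList X.toList hX

-- a head that is none of the three keys looks up to none
theorem pv_nomatch_get (l : List Char)
    (h1 : l ≠ ("Instruction" : String).toList) (h2 : l ≠ ("Fact" : String).toList)
    (h3 : l ≠ ("Preference" : String).toList) :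
    PySem.Dict.get? pvTypes (String.ofList l) = none := by
  have b1 : (("Instruction" : String) == String.ofList l) = false := by
    rw [beq_eq_false_iff_ne]
    intro h
    exact h1 (by rw [h, String.toList_ofList])
  have b2 : (("Fact" : String) == String.ofList l) = false := by
    rw [beq_eq_false_iff_ne]
    intro h
    exact h2 (by rw [h, String.toList_ofList])
  have b3 : (("Preference" : String) == String.ofList l) = false := by
    rw [beq_eq_false_iff_ne]
    intro h
    exact h3 (by rw [h, String.toList_ofList])
  simp [PySem.Dict.get?, pvTypes, List.find?, b1, b2, b3]

-- the matched case: A's item for prefix p equals B's partition-built item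
theorem pv_matched (text p X ty : String)
    (hpl : p.toList = X.toList ++ [':'])
    (hget : PySem.Dict.get? pvTypes X = some ty)
    (hty : PySem.Str.lower (pvRstripColon p) = ty)
    (hnn : 0 ≤ PySem.Chars.find text.toList [':'])
    (hc : text.toList.take (PySem.Chars.find text.toList [':']).toNat = X.toList) :
    [("type", PySem.Str.lower (pvRstripColon p)),
     ("content", PySem.Str.strip (PySem.Str.slice text (some (PySem.Str.len p)) none))]
      = pvNoteB text := by
  have hfind : PySem.Str.find text ":" = PySem.Chars.find text.toList [':'] := by
    rw [PySem.Str.find_eq]; rfl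
  have hfneq : ((PySem.Chars.find text.toList [':'] == -1) : Bool) = false := by
    rw [beq_eq_false_iff_ne]; omega
  have hkle : (PySem.Chars.find text.toList [':']).toNat ≤ text.toList.length := by
    have := PySem.Chars.find_le_length text.toList [':']
    omega
  have hklen : (PySem.Chars.find text.toList [':']).toNat = X.toList.length := by
    have h1 := congrArg List.length hc
    rw [List.length_take] at h1
    omega
  have hplen : PySem.Str.len p = ((X.toList.length : Int) + 1) := by
    have h1 := congrArg List.length hpl
    rw [List.length_append, List.length_cons, List.length_nil] at h1
    rw [PySem.Str.len_eq]
    omega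
  have hhead : String.ofList (text.toList.take (PySem.Chars.find text.toList [':']).toNat) = X := by
    rw [hc]
    exact String.toList_inj.mp (by rw [String.toList_ofList])
  have hcontent : PySem.Str.strip (PySem.Str.slice text (some (PySem.Str.len p)) none)
      = PySem.Str.strip (String.ofList (text.toList.drop ((PySem.Chars.find text.toList [':']).toNat + 1))) := by
    apply String.toList_inj.mp
    rw [PySem.Str.toList_strip, PySem.Str.toList_strip, PySem.Str.toList_slice, String.toList_ofList]
    rw [hplen]
    simp only [PySem.Chars.slice]
    rw [PySem.List.slice_from _ (by omega),
      show ((X.toList.length : Int) + 1).toNat = (PySem.Chars.find text.toList [':']).toNat + 1 by omega]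
  have hcol : (":" : String) ≠ "" := by decide
  simp only [pvNoteB, pvPartitionColon, hfind, hfneq, Bool.false_eq_true, if_false, hhead, hget]
  rw [if_pos hcol]
  rw [hty, hcontent]

-- per-line: A's prefix chain equals B's partition + lookup
theorem pv_note_eq (text : String) :
    pvInnerA ["Instruction:", "Fact:", "Preference:"] text = pvNoteB text := by
  have hI := pv_sw_iff text "Instruction:" "Instruction" (by decide) (by decide)
  have hF := pv_sw_iff text "Fact:" "Fact" (by decide) (by decide)
  have hP := pv_sw_iff text "Preference:" "Preference" (by decide) (by decide)
  have hfind : PySem.Str.find text ":" = PySem.Chars.find text.toList [':'] := by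
    rw [PySem.Str.find_eq]; rfl
  by_cases hnn : 0 ≤ PySem.Chars.find text.toList [':']
  · by_cases hcI : text.toList.take (PySem.Chars.find text.toList [':']).toNat = ("Instruction" : String).toList
    · have hsw : PySem.Str.startswith text "Instruction:" = true := hI.mpr ⟨hnn, hcI⟩
      simp only [pvInnerA, hsw, if_true]
      exact pv_matched text "Instruction:" "Instruction" "instruction" (by decide) (by decide)
        (by decide) hnn hcI
    · have hswI : PySem.Str.startswith text "Instruction:" = false := by
        rw [Bool.eq_false_iff]; intro hb; exact hcI (hI.mp hb).2
      by_cases hcF : text.toList.take (PySem.Chars.find text.toList [':']).toNat = ("Fact" : String).toList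
      · have hsw : PySem.Str.startswith text "Fact:" = true := hF.mpr ⟨hnn, hcF⟩
        simp only [pvInnerA, hswI, hsw, Bool.false_eq_true, if_false, if_true]
        exact pv_matched text "Fact:" "Fact" "fact" (by decide) (by decide) (by decide) hnn hcF
      · have hswF : PySem.Str.startswith text "Fact:" = false := by
          rw [Bool.eq_false_iff]; intro hb; exact hcF (hF.mp hb).2
        by_cases hcP : text.toList.take (PySem.Chars.find text.toList [':']).toNat = ("Preference" : String).toList
        · have hsw : PySem.Str.startswith text "Preference:" = true := hP.mpr ⟨hnn, hcP⟩
          simp only [pvInnerA, hswI, hswF, hsw, Bool.false_eq_true, if_false, if_true]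
          exact pv_matched text "Preference:" "Preference" "preference" (by decide) (by decide)
            (by decide) hnn hcP
        · have hswP : PySem.Str.startswith text "Preference:" = false := by
            rw [Bool.eq_false_iff]; intro hb; exact hcP (hP.mp hb).2
          have hfneq : ((PySem.Chars.find text.toList [':'] == -1) : Bool) = false := by
            rw [beq_eq_false_iff_ne]; omega
          have hnone := pv_nomatch_get (text.toList.take (PySem.Chars.find text.toList [':']).toNat)
            hcI hcF hcP
          have hcol : (":" : String) ≠ "" := by decide
          simp only [pvInnerA, hswI, hswF, hswP, Bool.false_eq_true, if_false,
            pvNoteB, pvPartitionColon, hfind, hfneq, hnone]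
          rw [if_pos hcol]
  · have hne : PySem.Chars.find text.toList [':'] = -1 := by
      have := PySem.Chars.neg_one_le_find text.toList [':']
      omega
    have hswI : PySem.Str.startswith text "Instruction:" = false := by
      rw [Bool.eq_false_iff]; intro hb; exact hnn (hI.mp hb).1
    have hswF : PySem.Str.startswith text "Fact:" = false := by
      rw [Bool.eq_false_iff]; intro hb; exact hnn (hF.mp hb).1
    have hswP : PySem.Str.startswith text "Preference:" = false := by
      rw [Bool.eq_false_iff]; intro hb; exact hnn (hP.mp hb).1
    have hfeq : ((PySem.Chars.find text.toList [':'] == -1) : Bool) = true := by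
      rw [beq_iff_eq]; omega
    have hncol : ¬(("" : String) ≠ "") := by simp
    simp only [pvInnerA, hswI, hswF, hswP, Bool.false_eq_true, if_false,
      pvNoteB, pvPartitionColon, hfind, hfeq, if_true]
    rw [if_neg hncol]

-- the outer loop: A's foldl over lines = B's map over filter over map (bespoke to these two ports)
theorem pv_outer (lines : List String)
    (acc : List (List (String × String))) :
    lines.foldl (fun notes line =>
      let line := PySem.Str.strip line
      if !(PySem.Str.startswith line "- ") then notes
      else
        notes ++ [pvInnerA ["Instruction:", "Fact:", "Preference:"]
                    (PySem.Str.strip (PySem.Str.slice line (some 2) none))]) acc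
    = acc ++ (((lines.map PySem.Str.strip).filter (fun l => PySem.Str.startswith l "- ")).map
        (fun l => pvNoteB (PySem.Str.strip (PySem.Str.slice l (some 2) none)))) := by
  induction lines generalizing acc with
  | nil => simp
  | cons l ls ih =>
    rw [List.foldl_cons, List.map_cons, List.filter_cons]
    cases h : PySem.Str.startswith (PySem.Str.strip l) "- " with
    | false =>
      simp only [h, Bool.not_false, if_true, Bool.false_eq_true, if_false]
      exact ih acc
    | true =>
      simp only [h, Bool.not_true, Bool.false_eq_true, if_false, if_true, List.map_cons]
      rw [ih]
      simp [pv_note_eq]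

-- ===== VERDICT (by name: the statement is the Claim_ definition above) =====
theorem parse_notes_md_py_spec : Claim_equal_parse_notes_md_py := by
  unfold Claim_equal_parse_notes_md_py
  intro content _
  unfold Spec_parse_notes_md_py parse_notes_md_py parse_notes_md_py_alt
  cases content with
  | none => rfl
  | some s =>
    by_cases hs : s == ""
    · simp [hs]
    · simp only [hs, Bool.false_eq_true, if_false]
      exact (pv_outer _ []).trans (by simp)
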